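-- pv_equiv track=rewrite | github.com/StevenBtw/AoC_2025 | day10/part2.py | explode_data
-- ===== SOURCE A (Python) =====
-- def explode_data(machines):
--     all_targets = []
--     target_offsets = []
--     num_counters = []
--     max_target_per_machine = []
--
--     all_button_indices = []
--     button_index_offsets = []
--     button_index_counts = []
--     buttons_per_machine = []
--     button_group_offsets = []
--
--     current_target_offset = 0
--     current_btn_offset = 0
--     current_idx_offset = 0
--
--     for buttons, joltage in machines:
--         all_targets.extend(joltage)
--         target_offsets.append(current_target_offset)
--         num_counters.append(len(joltage))
--         max_target_per_machine.append(max(joltage))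
--         current_target_offset += len(joltage)
--
--         buttons_per_machine.append(len(buttons))
--         button_group_offsets.append(current_btn_offset)
--         current_btn_offset += len(buttons)
--
--         for btn in buttons:
--             all_button_indices.extend(btn)
--             button_index_offsets.append(current_idx_offset)
--             button_index_counts.append(len(btn))
--             current_idx_offset += len(btn)
--
--     return {
--         'targets': all_targets,
--         'target_offsets': target_offsets,
--         'num_counters': num_counters,
--         'max_target': max_target_per_machine,
--         'btn_indices': all_button_indices,
--         'btn_idx_offsets': button_index_offsets,
--         'btn_idx_counts': button_index_counts,
--         'btns_per_machine': buttons_per_machine,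
--         'btn_grp_offsets': button_group_offsets,
--     }
-- ===== SOURCE B (Python) =====
-- def _excl_prefix_sums(counts):
--     offsets = []
--     total = 0
--     for c in counts:
--         offsets.append(total)
--         total += c
--     return offsets
--
--
-- def explode_data(machines):
--     # phase 1: flatten only (no offset threading)
--     num_counters = [len(j) for _, j in machines]
--     max_target = [max(j) for _, j in machines]
--     all_targets = [t for _, j in machines for t in j]
--     buttons_per_machine = [len(b) for b, _ in machines]
--     flat_buttons = [btn for b, _ in machines for btn in b]
--     all_button_indices = [i for btn in flat_buttons for i in btn]
--     btn_idx_counts = [len(btn) for btn in flat_buttons]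
--     # phase 2: all offset tables are exclusive prefix sums of the count tables
--     return {
--         'targets': all_targets,
--         'target_offsets': _excl_prefix_sums(num_counters),
--         'num_counters': num_counters,
--         'max_target': max_target,
--         'btn_indices': all_button_indices,
--         'btn_idx_offsets': _excl_prefix_sums(btn_idx_counts),
--         'btn_idx_counts': btn_idx_counts,
--         'btns_per_machine': buttons_per_machine,
--         'btn_grp_offsets': _excl_prefix_sums(buttons_per_machine),
--     }
-- ===== Notes on version B (the rewrite author's own statement) =====
-- stated objective: alternative
-- what changed: A threads three running offset counters through one nested loop; B first flattens everything with comprehensions and then builds each offset table separately as an exclusive prefix sum of the corresponding count list.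
import Mathlib
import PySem

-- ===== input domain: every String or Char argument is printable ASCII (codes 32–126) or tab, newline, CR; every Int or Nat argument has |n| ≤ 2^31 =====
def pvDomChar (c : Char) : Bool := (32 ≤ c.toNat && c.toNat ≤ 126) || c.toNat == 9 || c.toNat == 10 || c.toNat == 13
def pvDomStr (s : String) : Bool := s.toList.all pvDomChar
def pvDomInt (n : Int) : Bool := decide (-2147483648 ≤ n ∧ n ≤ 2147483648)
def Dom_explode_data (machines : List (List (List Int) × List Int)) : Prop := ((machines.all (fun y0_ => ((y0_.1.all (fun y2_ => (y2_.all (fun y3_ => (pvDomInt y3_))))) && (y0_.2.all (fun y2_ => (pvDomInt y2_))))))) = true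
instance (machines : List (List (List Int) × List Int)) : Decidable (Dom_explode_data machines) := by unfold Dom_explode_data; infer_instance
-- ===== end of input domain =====

-- B replaces A's offset-counter threading with a flatten phase followed by exclusive prefix sums (alternative decomposition, same cost).


-- ===== PORT A =====
-- Python's max(xs) (raises on an empty list, excluded by Pre_); both Pythons call max identically.
def pymax (l : List Int) : Int := (PySem.List.max? l (fun x => x)).getD 0

structure AState where
  all_targets : List Int
  target_offsets : List Int
  num_counters : List Int
  max_target : List Int
  all_button_indices : List Int
  button_index_offsets : List Int
  button_index_counts : List Int
  buttons_per_machine : List Int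
  button_group_offsets : List Int
  cur_t : Int
  cur_b : Int
  cur_i : Int
deriving Repr, DecidableEq

-- body of A's inner `for btn in buttons` loop
def innerStep (s : AState) (btn : List Int) : AState :=
  { s with
    all_button_indices := s.all_button_indices ++ btn,
    button_index_offsets := s.button_index_offsets ++ [s.cur_i],
    button_index_counts := s.button_index_counts ++ [(btn.length : Int)],
    cur_i := s.cur_i + (btn.length : Int) }

-- body of A's outer `for buttons, joltage in machines` loop
def outerStep (s : AState) (m : List (List Int) × List Int) : AState :=
  let s1 : AState :=
    { s with
      all_targets := s.all_targets ++ m.2,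
      target_offsets := s.target_offsets ++ [s.cur_t],
      num_counters := s.num_counters ++ [(m.2.length : Int)],
      max_target := s.max_target ++ [pymax m.2],
      cur_t := s.cur_t + (m.2.length : Int),
      buttons_per_machine := s.buttons_per_machine ++ [(m.1.length : Int)],
      button_group_offsets := s.button_group_offsets ++ [s.cur_b],
      cur_b := s.cur_b + (m.1.length : Int) }
  m.1.foldl innerStep s1

def explode_data (machines : List (List (List Int) × List Int)) : List (String × List Int) :=
  let s := machines.foldl outerStep ⟨[], [], [], [], [], [], [], [], [], 0, 0, 0⟩
  [("targets", s.all_targets),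
   ("target_offsets", s.target_offsets),
   ("num_counters", s.num_counters),
   ("max_target", s.max_target),
   ("btn_indices", s.all_button_indices),
   ("btn_idx_offsets", s.button_index_offsets),
   ("btn_idx_counts", s.button_index_counts),
   ("btns_per_machine", s.buttons_per_machine),
   ("btn_grp_offsets", s.button_group_offsets)]

-- ===== PORT B =====
-- Source B's _excl_prefix_sums loop (list + running total)
def exclPrefixSums (counts : List Int) : List Int :=
  (counts.foldl (fun (p : List Int × Int) c => (p.1 ++ [p.2], p.2 + c)) ([], 0)).1

def explode_data_alt (machines : List (List (List Int) × List Int)) : List (String × List Int) :=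
  let num_counters := machines.map (fun m => ((m.2.length : Int)))
  let max_target := machines.map (fun m => pymax m.2)
  let all_targets := machines.flatMap (fun m => m.2)
  let buttons_per_machine := machines.map (fun m => ((m.1.length : Int)))
  let flat_buttons := machines.flatMap (fun m => m.1)
  let all_button_indices := flat_buttons.flatMap (fun b => b)
  let btn_idx_counts := flat_buttons.map (fun b => ((b.length : Int)))
  [("targets", all_targets),
   ("target_offsets", exclPrefixSums num_counters),
   ("num_counters", num_counters),
   ("max_target", max_target),
   ("btn_indices", all_button_indices),
   ("btn_idx_offsets", exclPrefixSums btn_idx_counts),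
   ("btn_idx_counts", btn_idx_counts),
   ("btns_per_machine", buttons_per_machine),
   ("btn_grp_offsets", exclPrefixSums buttons_per_machine)]

-- ===== PRECONDITION & SPEC =====
-- Pre_ excludes machines whose joltage list is empty: there Python's max on the empty sequence raises ValueError in A (and in B).
def Pre_explode_data (machines : List (List (List Int) × List Int)) : Prop :=
  ∀ m ∈ machines, m.2 ≠ []
instance (machines : List (List (List Int) × List Int)) : Decidable (Pre_explode_data machines) := by unfold Pre_explode_data; infer_instance

def pvWitness_explode_data : (List (List (List Int) × List Int)) := [([[0], [1, 2]], [3, 4])]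

def Spec_explode_data (machines : List (List (List Int) × List Int)) (out : List (String × List Int)) : Prop := out = explode_data_alt machines
instance (machines : List (List (List Int) × List Int)) (out : List (String × List Int)) : Decidable (Spec_explode_data machines out) := by unfold Spec_explode_data; infer_instance

-- ===== CLAIM (what is proved, stated in full; the proofs are below) =====
def Claim_equal_explode_data : Prop := ∀ (machines : List (List (List Int) × List Int)), Dom_explode_data machines → Pre_explode_data machines → Spec_explode_data machines (explode_data machines)

-- ===== LEMMAS AND PROOFS =====

-- exclusive prefix sums starting at a
def prefixes (a : Int) : List Int → List Int
  | [] => []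
  | c :: cs => a :: prefixes (a + c) cs

theorem prefixes_append (a : Int) (xs ys : List Int) :
    prefixes a (xs ++ ys) = prefixes a xs ++ prefixes (a + xs.sum) ys := by
  induction xs generalizing a with
  | nil => simp [prefixes]
  | cons x t ih => simp [prefixes, ih, add_assoc]

theorem foldl_prefix (counts : List Int) (l : List Int) (a : Int) :
    counts.foldl (fun (p : List Int × Int) c => (p.1 ++ [p.2], p.2 + c)) (l, a)
      = (l ++ prefixes a counts, a + counts.sum) := by
  induction counts generalizing l a with
  | nil => simp [prefixes]
  | cons c cs ih => simp [prefixes, ih, add_assoc]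

theorem exclPrefixSums_eq (counts : List Int) : exclPrefixSums counts = prefixes 0 counts := by
  simp [exclPrefixSums, foldl_prefix]

theorem inner_fold (buttons : List (List Int)) (s : AState) :
    buttons.foldl innerStep s =
      { s with
        all_button_indices := s.all_button_indices ++ buttons.flatMap (fun b => b),
        button_index_offsets := s.button_index_offsets ++ prefixes s.cur_i (buttons.map (fun b => (b.length : Int))),
        button_index_counts := s.button_index_counts ++ buttons.map (fun b => (b.length : Int)),
        cur_i := s.cur_i + (buttons.map (fun b => (b.length : Int))).sum } := by
  induction buttons generalizing s with
  | nil => simp [prefixes]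
  | cons b t ih => simp [innerStep, ih, prefixes, add_assoc]

theorem outer_fold (machines : List (List (List Int) × List Int)) (s : AState) :
    machines.foldl outerStep s =
      { all_targets := s.all_targets ++ machines.flatMap (fun m => m.2),
        target_offsets := s.target_offsets ++ prefixes s.cur_t (machines.map (fun m => (m.2.length : Int))),
        num_counters := s.num_counters ++ machines.map (fun m => (m.2.length : Int)),
        max_target := s.max_target ++ machines.map (fun m => pymax m.2),
        all_button_indices := s.all_button_indices ++ (machines.flatMap (fun m => m.1)).flatMap (fun b => b),
        button_index_offsets := s.button_index_offsets ++ prefixes s.cur_i ((machines.flatMap (fun m => m.1)).map (fun b => (b.length : Int))),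
        button_index_counts := s.button_index_counts ++ (machines.flatMap (fun m => m.1)).map (fun b => (b.length : Int)),
        buttons_per_machine := s.buttons_per_machine ++ machines.map (fun m => (m.1.length : Int)),
        button_group_offsets := s.button_group_offsets ++ prefixes s.cur_b (machines.map (fun m => (m.1.length : Int))),
        cur_t := s.cur_t + (machines.map (fun m => (m.2.length : Int))).sum,
        cur_b := s.cur_b + (machines.map (fun m => (m.1.length : Int))).sum,
        cur_i := s.cur_i + ((machines.flatMap (fun m => m.1)).map (fun b => (b.length : Int))).sum } := by
  induction machines generalizing s with
  | nil => simp [prefixes]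
  | cons m t ih =>
    simp only [List.foldl_cons, outerStep, inner_fold, ih]
    simp [prefixes, prefixes_append, add_assoc]

-- ===== VERDICT (by name: the statement is the Claim_ definition above) =====
theorem explode_data_spec : Claim_equal_explode_data := by
  intro machines _ _
  show _ = _
  simp [explode_data, explode_data_alt, outer_fold, exclPrefixSums_eq]
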